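-- pv_equiv track=rewrite | github.com/fdexheim/N-Puzzle | tools.py | tile_yx_snail
-- ===== SOURCE A (Python) =====
-- def tile_yx_snail(flat_pos, puzzle_size):
--     start_x = -1
--     start_y = 0;
--     end_x = puzzle_size - 1
--     end_y = puzzle_size - 1
--     x = 0
--     y = 0
--     ymove = 0
--     xmove = 1
--
--     ran = puzzle_size * puzzle_size
--     for i in range(0, ran + 1):
--         if (i == flat_pos):
--             return y, x
--         if (x == end_x and y == start_y):
--             xmove = 0
--             ymove = 1
--             start_x += 1
--         elif (x == end_x and y == end_y):
--             xmove = -1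
--             ymove = 0
--             start_y += 1
--         elif (x == start_x and y == end_y):
--             xmove = 0
--             ymove = -1
--             end_x -= 1
--         elif (x == start_x and y == start_y):
--             xmove = 1
--             ymove = 0
--             end_y -= 1
--         y += ymove;
--         x += xmove;
--     return 0, 0
-- ===== SOURCE B (Python) =====
-- def tile_yx_snail(flat_pos, puzzle_size):
--     n = puzzle_size
--     if n < 1 or flat_pos < 0 or flat_pos >= n * n:
--         return 0, 0
--     # peel rings: ring k (side m = n - 2k) holds 4*(m-1) cells (1 if m == 1)
--     k = 0
--     m = n
--     j = flat_pos
--     while m > 1 and j >= 4 * (m - 1):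
--         j -= 4 * (m - 1)
--         m -= 2
--         k += 1
--     if m == 1:
--         return k, k
--     s = m - 1
--     if j < s:
--         return k, k + j
--     if j < 2 * s:
--         return k + (j - s), k + s
--     if j < 3 * s:
--         return k + s, k + (3 * s - j)
--     return k + (4 * s - j), k
-- ===== Notes on version B (the rewrite author's own statement) =====
-- stated objective: faster
-- what changed: A walks the spiral cell by cell (one loop iteration per cell, O(n^2)); B peels whole rings (4*(m-1) cells at a time) and computes the coordinate in closed form on the ring's four sides.
-- intended difference: For puzzle_size >= 1 (other than 2) and flat_pos equal to puzzle_size squared, one past the last cell, A returns the walker's position one step beyond the final spiral cell, while B returns the out-of-range fallback value y = 0, x = 0 that A itself uses for every other invalid index. — e.g. on tile_yx_snail(1, 1): A returns [1, 0], B returns [0, 0]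
-- outside the precondition, e.g. on tile_yx_snail(3, -2): A returns (0, 3), B returns (0, 0)
import Mathlib
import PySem

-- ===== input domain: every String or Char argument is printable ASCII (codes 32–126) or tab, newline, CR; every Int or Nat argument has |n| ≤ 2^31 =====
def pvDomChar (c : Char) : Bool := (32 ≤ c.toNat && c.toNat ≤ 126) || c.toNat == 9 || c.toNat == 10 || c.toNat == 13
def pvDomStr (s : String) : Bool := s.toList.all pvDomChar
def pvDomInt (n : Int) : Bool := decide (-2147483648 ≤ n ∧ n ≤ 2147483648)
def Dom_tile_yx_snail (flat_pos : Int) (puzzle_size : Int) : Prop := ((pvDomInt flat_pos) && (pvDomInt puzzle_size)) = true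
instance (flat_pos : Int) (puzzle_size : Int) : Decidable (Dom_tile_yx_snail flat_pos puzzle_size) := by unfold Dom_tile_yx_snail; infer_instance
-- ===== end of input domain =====

-- B replaces A's cell-by-cell spiral walk (one loop iteration per cell) by peeling whole
-- rings and a closed-form position on the ring's four sides; ports follow each source's structure.

-- ===== PORT A =====
-- the spiral walker's state: walls (start_x,start_y,end_x,end_y), position (x,y), direction (ymove,xmove)
structure StA where
  sx : Int
  sy : Int
  ex : Int
  ey : Int
  x : Int
  y : Int
  ym : Int
  xm : Int
deriving DecidableEq, Repr

-- one iteration of A's for-body after the `i == flat_pos` test: the four corner checks in source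
-- order; Python's unconditional `y += ymove; x += xmove` is applied at the end of each branch
-- with that branch's (ymove, xmove) values, which is exactly what A computes.
def bodyA (st : StA) : StA :=
  if st.x = st.ex ∧ st.y = st.sy then ⟨st.sx + 1, st.sy, st.ex, st.ey, st.x + 0, st.y + 1, 1, 0⟩
  else if st.x = st.ex ∧ st.y = st.ey then ⟨st.sx, st.sy + 1, st.ex, st.ey, st.x + -1, st.y + 0, 0, -1⟩
  else if st.x = st.sx ∧ st.y = st.ey then ⟨st.sx, st.sy, st.ex - 1, st.ey, st.x + 0, st.y + -1, -1, 0⟩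
  else if st.x = st.sx ∧ st.y = st.sy then ⟨st.sx, st.sy, st.ex, st.ey - 1, st.x + 1, st.y + 0, 0, 1⟩
  else ⟨st.sx, st.sy, st.ex, st.ey, st.x + st.xm, st.y + st.ym, st.ym, st.xm⟩

-- A's `for i in range(0, ran + 1)` loop with the early return; fuel = remaining iterations
def loopA (flat_pos : Int) : Nat → Int → StA → List Int
  | 0, _, _ => [0, 0]
  | fuel + 1, i, st => if i = flat_pos then [st.y, st.x] else loopA flat_pos fuel (i + 1) (bodyA st)

def tile_yx_snail (flat_pos : Int) (puzzle_size : Int) : List Int :=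
  let ran := puzzle_size * puzzle_size
  loopA flat_pos (ran + 1).toNat 0 ⟨-1, 0, puzzle_size - 1, puzzle_size - 1, 0, 0, 0, 1⟩

-- ===== PORT B =====
-- B's while loop: peel full rings (the ring of side m holds 4*(m-1) cells) until flat_pos falls inside
def ringB (j m k : Int) : Int × Int × Int :=
  if h : 1 < m ∧ 4 * (m - 1) ≤ j then ringB (j - 4 * (m - 1)) (m - 2) (k + 1) else (j, m, k)
termination_by m.toNat
decreasing_by omega

-- B's tail: closed-form position on the four sides of ring k (side m, offset j)
def sideB (j m k : Int) : List Int :=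
  if m = 1 then [k, k]
  else if j < m - 1 then [k, k + j]
  else if j < 2 * (m - 1) then [k + (j - (m - 1)), k + (m - 1)]
  else if j < 3 * (m - 1) then [k + (m - 1), k + (3 * (m - 1) - j)]
  else [k + (4 * (m - 1) - j), k]

def tile_yx_snail_alt (flat_pos : Int) (puzzle_size : Int) : List Int :=
  let n := puzzle_size
  if n < 1 ∨ flat_pos < 0 ∨ n * n ≤ flat_pos then [0, 0]
  else
    let r := ringB flat_pos n 0
    sideB r.1 r.2.1 r.2.2

-- ===== PRECONDITION & SPEC =====
-- Pre_ excludes only negative puzzle sizes paired with 0 ≤ flat_pos ≤ puzzle_size², i.e. inputs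
-- outside the task's natural domain (a board has nonnegative size), on which A's walk degenerates
-- to returning y = 0, x = flat_pos.
def Pre_tile_yx_snail (flat_pos : Int) (puzzle_size : Int) : Prop :=
  0 ≤ puzzle_size ∨ flat_pos < 0 ∨ puzzle_size * puzzle_size < flat_pos

instance (flat_pos : Int) (puzzle_size : Int) : Decidable (Pre_tile_yx_snail flat_pos puzzle_size) := by
  unfold Pre_tile_yx_snail; infer_instance

def pvWitness_tile_yx_snail : Int × Int := (5, 3)

-- For puzzle_size ≥ 1 (other than 2) and flat_pos equal to puzzle_size squared, one past the
-- last cell, A returns the walker's position one step beyond the final spiral cell, while B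
-- returns the out-of-range fallback value y = 0, x = 0 that A uses for every other invalid index.
def D_tile_yx_snail (flat_pos : Int) (puzzle_size : Int) : Prop :=
  1 ≤ puzzle_size ∧ puzzle_size ≠ 2 ∧ flat_pos = puzzle_size * puzzle_size

instance (flat_pos : Int) (puzzle_size : Int) : Decidable (D_tile_yx_snail flat_pos puzzle_size) := by
  unfold D_tile_yx_snail; infer_instance

def Spec_tile_yx_snail (flat_pos : Int) (puzzle_size : Int) (out : List Int) : Prop :=
  ¬ D_tile_yx_snail flat_pos puzzle_size → out = tile_yx_snail_alt flat_pos puzzle_size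

instance (flat_pos : Int) (puzzle_size : Int) (out : List Int) : Decidable (Spec_tile_yx_snail flat_pos puzzle_size out) := by
  unfold Spec_tile_yx_snail; infer_instance

def pvDiffWitness_tile_yx_snail : Int × Int := (1, 1)

def pvDiffWitnessOut_tile_yx_snail : (List Int) × (List Int) := ([1, 0], [0, 0])

-- ===== CLAIM (what is proved, stated in full; the proofs are below) =====
def Claim_unchanged_tile_yx_snail : Prop := ∀ (flat_pos : Int) (puzzle_size : Int), Dom_tile_yx_snail flat_pos puzzle_size → Pre_tile_yx_snail flat_pos puzzle_size → Spec_tile_yx_snail flat_pos puzzle_size (tile_yx_snail flat_pos puzzle_size)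
def Claim_changed_tile_yx_snail : Prop := Dom_tile_yx_snail (pvDiffWitness_tile_yx_snail.1) (pvDiffWitness_tile_yx_snail.2) ∧ Pre_tile_yx_snail (pvDiffWitness_tile_yx_snail.1) (pvDiffWitness_tile_yx_snail.2) ∧ D_tile_yx_snail (pvDiffWitness_tile_yx_snail.1) (pvDiffWitness_tile_yx_snail.2) ∧ tile_yx_snail (pvDiffWitness_tile_yx_snail.1) (pvDiffWitness_tile_yx_snail.2) = pvDiffWitnessOut_tile_yx_snail.1 ∧ tile_yx_snail_alt (pvDiffWitness_tile_yx_snail.1) (pvDiffWitness_tile_yx_snail.2) = pvDiffWitnessOut_tile_yx_snail.2 ∧ pvDiffWitnessOut_tile_yx_snail.1 ≠ pvDiffWitnessOut_tile_yx_snail.2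
def Claim_exact_tile_yx_snail : Prop := ∀ (flat_pos : Int) (puzzle_size : Int), Dom_tile_yx_snail flat_pos puzzle_size → Pre_tile_yx_snail flat_pos puzzle_size → D_tile_yx_snail flat_pos puzzle_size → tile_yx_snail flat_pos puzzle_size ≠ tile_yx_snail_alt flat_pos puzzle_size

-- ===== LEMMAS AND PROOFS =====

-- iterate A's body t times (proof-side view of A's loop)
def iterA : Nat → StA → StA
  | 0, st => st
  | t + 1, st => iterA t (bodyA st)

theorem iterA_add (a b : Nat) (st : StA) : iterA (a + b) st = iterA b (iterA a st) := by
  induction a generalizing st with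
  | zero => simp [iterA]
  | succ a ih => rw [Nat.succ_add]; exact ih (bodyA st)

theorem iterA_succ' (t : Nat) (st : StA) : iterA (t + 1) st = bodyA (iterA t st) := by
  induction t generalizing st with
  | zero => rfl
  | succ t ih => exact ih (bodyA st)

theorem loopA_miss (flat_pos : Int) (fuel : Nat) (i : Int) (st : StA)
    (h : flat_pos < i ∨ i + fuel ≤ flat_pos) : loopA flat_pos fuel i st = [0, 0] := by
  induction fuel generalizing i st with
  | zero => rfl
  | succ fuel ih =>
      simp only [loopA]
      rw [if_neg (by omega), ih (i + 1) (bodyA st) (by omega)]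

theorem loopA_hit (flat_pos : Int) (fuel : Nat) (i : Int) (st : StA)
    (h1 : i ≤ flat_pos) (h2 : flat_pos < i + fuel) :
    loopA flat_pos fuel i st = [(iterA (flat_pos - i).toNat st).y, (iterA (flat_pos - i).toNat st).x] := by
  induction fuel generalizing i st with
  | zero => omega
  | succ fuel ih =>
      simp only [loopA]
      by_cases h : i = flat_pos
      · rw [if_pos h]
        have h0 : (flat_pos - i).toNat = 0 := by omega
        rw [h0]; rfl
      · rw [if_neg h, ih (i + 1) (bodyA st) (by omega) (by omega)]
        have hs : (flat_pos - i).toNat = (flat_pos - (i + 1)).toNat + 1 := by omega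
        rw [hs]; rfl

-- the state of A's walk at the start of ring k (side n - 2k)
def ringStart (n k : Int) : StA := ⟨k - 1, k, n - 1 - k, n - 1 - k, k, k, 0, 1⟩

-- the state of A's walk j steps into ring k, for 0 ≤ j ≤ 4(m-1)-1, m = n - 2k ≥ 2
def segState (n k j : Int) : StA :=
  if j ≤ n - 2 * k - 1 then ⟨k - 1, k, n - 1 - k, n - 1 - k, k + j, k, 0, 1⟩
  else if j ≤ 2 * (n - 2 * k - 1) then ⟨k, k, n - 1 - k, n - 1 - k, n - 1 - k, k + (j - (n - 2 * k - 1)), 1, 0⟩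
  else if j ≤ 3 * (n - 2 * k - 1) then ⟨k, k + 1, n - 1 - k, n - 1 - k, k + (3 * (n - 2 * k - 1) - j), n - 1 - k, 0, -1⟩
  else ⟨k, k + 1, n - 2 - k, n - 1 - k, k, k + (4 * (n - 2 * k - 1) - j), -1, 0⟩

theorem segState_zero (n k : Int) (h : 2 ≤ n - 2 * k) : segState n k 0 = ringStart n k := by
  simp only [segState, ringStart, if_pos (by omega : (0 : Int) ≤ n - 2 * k - 1), StA.mk.injEq,
    and_true, true_and]
  omega

theorem seg_step (n k j : Int) (hm : 2 ≤ n - 2 * k) (hj0 : 0 ≤ j) (hj : j ≤ 4 * (n - 2 * k - 1) - 2) :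
    bodyA (segState n k j) = segState n k (j + 1) := by
  simp only [segState, bodyA]
  split_ifs <;> first | omega | (simp only [StA.mk.injEq, and_true, true_and] at * <;> omega)

theorem ring_step (n k : Int) (hm : 3 ≤ n - 2 * k) :
    bodyA (segState n k (4 * (n - 2 * k - 1) - 1)) = ringStart n (k + 1) := by
  simp only [segState, bodyA, ringStart]
  split_ifs <;> first | omega | (simp only [StA.mk.injEq, and_true, true_and] at * <;> omega)

theorem seg_reach (n k : Int) (hm : 2 ≤ n - 2 * k) (j : Nat) (hj : (j : Int) ≤ 4 * (n - 2 * k - 1) - 1) :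
    iterA j (ringStart n k) = segState n k (j : Int) := by
  induction j with
  | zero => simpa [iterA] using (segState_zero n k hm).symm
  | succ j ih =>
      rw [iterA_succ', ih (by push_cast at hj ⊢; omega),
        seg_step n k j hm (by positivity) (by push_cast at hj ⊢; omega)]
      push_cast
      ring_nf

theorem ring_traverse (n k : Int) (hm : 3 ≤ n - 2 * k) :
    iterA (4 * (n - 2 * k - 1)).toNat (ringStart n k) = ringStart n (k + 1) := by
  have hsplit : (4 * (n - 2 * k - 1)).toNat = (4 * (n - 2 * k - 1) - 1).toNat + 1 := by omega
  rw [hsplit, iterA_succ',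
    seg_reach n k (by omega) (4 * (n - 2 * k - 1) - 1).toNat (by omega)]
  have hc : ((4 * (n - 2 * k - 1) - 1).toNat : Int) = 4 * (n - 2 * k - 1) - 1 := by omega
  rw [hc, ring_step n k hm]

theorem ringB_stop (j m k : Int) (h : ¬(1 < m ∧ 4 * (m - 1) ≤ j)) : ringB j m k = (j, m, k) := by
  rw [ringB, dif_neg h]

theorem ringB_go (j m k : Int) (h : 1 < m ∧ 4 * (m - 1) ≤ j) :
    ringB j m k = ringB (j - 4 * (m - 1)) (m - 2) (k + 1) := by
  rw [ringB, dif_pos h]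

-- A's walk position j steps into ring k equals B's closed form after ring peeling
theorem inner_eq : ∀ (mN : Nat) (n k j : Int), 0 ≤ k → n - 2 * k = (mN : Int) → 1 ≤ mN → 0 ≤ j →
    j < (mN : Int) * (mN : Int) →
    [(iterA j.toNat (ringStart n k)).y, (iterA j.toNat (ringStart n k)).x] =
      sideB (ringB j (n - 2 * k) k).1 (ringB j (n - 2 * k) k).2.1 (ringB j (n - 2 * k) k).2.2 := by
  intro mN
  induction mN using Nat.strong_induction_on with
  | _ mN ih =>
    intro n k j hk hm h1 hj0 hj
    by_cases hgo : 1 < (n - 2 * k) ∧ 4 * ((n - 2 * k) - 1) ≤ j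
    · -- peel one ring and recurse
      have hm3 : 3 ≤ n - 2 * k := by
        rcases hgo with ⟨hg1, hg2⟩
        by_contra hlt
        have hm2 : n - 2 * k = 2 := by omega
        rw [hm2] at hg2
        have : (mN : Int) = 2 := by omega
        have hj4 : j < 4 := by
          have : (mN : Int) * (mN : Int) = 4 := by rw [this]; norm_num
          omega
        omega
      have hmN3 : 3 ≤ mN := by omega
      have hsplit : j.toNat = (4 * (n - 2 * k - 1)).toNat + (j - 4 * (n - 2 * k - 1)).toNat := by omega
      rw [ringB_go _ _ _ hgo, hsplit, iterA_add, ring_traverse n k hm3]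
      have hrec := ih (mN - 2) (by omega) n (k + 1) (j - 4 * ((n - 2 * k) - 1))
        (by omega) (by push_cast; omega) (by omega) (by omega)
        (by
          have hc : ((mN - 2 : Nat) : Int) = (mN : Int) - 2 := by push_cast; omega
          rw [hc]
          have hr : ((mN : Int) - 2) * ((mN : Int) - 2) = (mN : Int) * (mN : Int) - 4 * (mN : Int) + 4 := by ring
          rw [hr]
          omega)
      have hmm : n - 2 * (k + 1) = (n - 2 * k) - 2 := by ring
      rw [hmm] at hrec
      convert hrec using 3 <;> omega
    · -- flat_pos lies inside ring k
      rw [ringB_stop _ _ _ hgo]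
      by_cases hm1 : (mN : Int) = 1
      · have hj1 : j = 0 := by
          have : (mN : Int) * (mN : Int) = 1 := by rw [hm1]; norm_num
          omega
        subst hj1
        simp only [Int.toNat_zero, iterA, sideB, ringStart]
        rw [if_pos (by omega : n - 2 * k = 1)]
      · have hm2 : 2 ≤ n - 2 * k := by omega
        have hjlt : j ≤ 4 * (n - 2 * k - 1) - 1 := by omega
        have hcast : (j.toNat : Int) = j := by omega
        rw [show iterA j.toNat (ringStart n k) = segState n k j from by
          rw [seg_reach n k hm2 j.toNat (by omega), hcast]]
        simp only [segState, sideB]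
        split_ifs <;> (try simp only [List.cons.injEq, and_true, true_and]) <;> omega

-- A's walker, run the full puzzle_size² steps, never ends at (0,0) except for size 2
theorem finalA : ∀ (mN : Nat) (n k : Int), 0 ≤ k → n - 2 * k = (mN : Int) → 1 ≤ mN →
    (mN % 2 = 1 ∨ 3 ≤ 2 * k + (mN : Int)) →
    [(iterA (mN * mN) (ringStart n k)).y, (iterA (mN * mN) (ringStart n k)).x] ≠ [0, 0] := by
  intro mN
  induction mN using Nat.strong_induction_on with
  | _ mN ih =>
    intro n k hk hm h1 hpar
    by_cases hm3 : 3 ≤ mN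
    · -- peel one ring
      obtain ⟨m', rfl⟩ : ∃ m', mN = m' + 2 := ⟨mN - 2, by omega⟩
      have hsq : (m' + 2) * (m' + 2) = 4 * ((m' + 2) - 1) + m' * m' := by ring_nf; omega
      have htr : (4 * ((n - 2 * k) - 1)).toNat = 4 * ((m' + 2) - 1) := by omega
      rw [hsq, iterA_add, ← htr, ring_traverse n k (by omega)]
      exact ih m' (by omega) n (k + 1) (by omega) (by push_cast; push_cast at hm; omega)
        (by omega) (by push_cast; push_cast at hpar ⊢; omega)
    · by_cases hm1 : mN = 1
      · subst hm1
        have hm' : n - 2 * k = 1 := by exact_mod_cast hm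
        rw [show (1 * 1 : Nat) = 0 + 1 from rfl, iterA_succ']
        simp only [iterA, bodyA, ringStart]
        split_ifs <;> (try simp only [ne_eq, List.cons.injEq, not_and, and_true, true_and] at *) <;>
          omega
      · have hm2 : mN = 2 := by omega
        subst hm2
        have hm' : n - 2 * k = 2 := by exact_mod_cast hm
        have hk1 : 1 ≤ k := by
          rcases hpar with hp | hp
          · omega
          · have : ((2 : Nat) : Int) = 2 := by norm_num
            omega
        have h4 : (2 * 2 : Nat) = 3 + 1 := by norm_num
        rw [h4, iterA_succ', seg_reach n k (by omega) 3 (by push_cast; omega)]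
        have hc3 : ((3 : Nat) : Int) = 3 := by norm_num
        rw [hc3]
        have hseg : segState n k (3 : Int) = ⟨k, k + 1, n - 1 - k, n - 1 - k, k, k + 1, 0, -1⟩ := by
          simp only [segState]
          rw [if_neg (by omega), if_neg (by omega), if_pos (by omega)]
          simp only [StA.mk.injEq, and_true, true_and]
          omega
        rw [hseg]
        simp only [bodyA]
        split_ifs <;> (try simp only [ne_eq, List.cons.injEq, not_and, and_true, true_and] at *) <;>
          omega

theorem alt_invalid (p n : Int) (h : n < 1 ∨ p < 0 ∨ n * n ≤ p) : tile_yx_snail_alt p n = [0, 0] := by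
  simp only [tile_yx_snail_alt]
  rw [if_pos h]

theorem fuel_cast (n : Int) : ((n * n + 1).toNat : Int) = n * n + 1 := by
  have := mul_self_nonneg n
  omega

-- ===== VERDICT (by name: the statement is the Claim_ definition above) =====
theorem tile_yx_snail_spec : Claim_unchanged_tile_yx_snail := by
  intro p n _ hpre hnd
  have hnn : 0 ≤ n * n := mul_self_nonneg n
  by_cases hinv : n < 1 ∨ p < 0 ∨ n * n ≤ p
  · rw [alt_invalid p n hinv]
    rcases hinv with hn1 | hp0 | hbig
    · -- size below 1: A misses unless n = 0 and p = 0, where it also returns [0,0]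
      rcases hpre with hn0 | hp0 | hbig
      · have hn : n = 0 := by omega
        subst hn
        by_cases hp : p = 0
        · subst hp; rfl
        · exact loopA_miss _ _ _ _ (by simp only [fuel_cast]; omega)
      · exact loopA_miss _ _ _ _ (by omega)
      · exact loopA_miss _ _ _ _ (by simp only [fuel_cast]; omega)
    · exact loopA_miss _ _ _ _ (by omega)
    · by_cases hpeq : p = n * n
      · -- one past the end: ¬D forces n = 2 (or n < 1, handled above)
        by_cases hn1 : 1 ≤ n
        · have hn2 : n = 2 := by
            by_contra hne
            exact hnd ⟨hn1, hne, hpeq⟩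
          subst hn2
          rw [show p = 4 from by omega]
          decide
        · rcases hpre with h | h | h <;> [skip; exact loopA_miss _ _ _ _ (by omega);
            exact loopA_miss _ _ _ _ (by simp only [fuel_cast]; omega)]
          have hn : n = 0 := by omega
          subst hn
          rw [show p = 0 from by omega]
          rfl
      · exact loopA_miss _ _ _ _ (by simp only [fuel_cast]; omega)
  · -- the normal case: 1 ≤ n and 0 ≤ p < n*n
    push_neg at hinv
    obtain ⟨hn1, hp0, hplt⟩ := hinv
    unfold tile_yx_snail
    rw [loopA_hit p _ 0 _ (by omega) (by simp only [fuel_cast]; omega)]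
    have hrs : (⟨-1, 0, n - 1, n - 1, 0, 0, 0, 1⟩ : StA) = ringStart n 0 := by
      simp only [ringStart, StA.mk.injEq]
      norm_num
    have hcast : ((n.toNat : Int)) = n := by omega
    have hmm : (n.toNat : Int) * (n.toNat : Int) = n * n := by rw [hcast]
    rw [show p - 0 = p from by ring, hrs]
    have := inner_eq n.toNat n 0 p (by omega) (by omega) (by omega) hp0 (by omega)
    rw [show n - 2 * 0 = n from by ring] at this
    rw [this]
    simp only [tile_yx_snail_alt]
    rw [if_neg (by push_neg; exact ⟨by omega, hp0, by omega⟩)]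

theorem tile_yx_snail_changed : Claim_changed_tile_yx_snail := by
  unfold Claim_changed_tile_yx_snail; decide

theorem tile_yx_snail_tight : Claim_exact_tile_yx_snail := by
  intro p n _ _ hd
  obtain ⟨hn1, hn2, hpeq⟩ := hd
  have hnn : 0 ≤ n * n := mul_self_nonneg n
  rw [alt_invalid p n (by omega)]
  unfold tile_yx_snail
  rw [loopA_hit p _ 0 _ (by omega) (by simp only [fuel_cast]; omega)]
  have hrs : (⟨-1, 0, n - 1, n - 1, 0, 0, 0, 1⟩ : StA) = ringStart n 0 := by
    simp only [ringStart, StA.mk.injEq]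
    norm_num
  have hcast : ((n.toNat : Int)) = n := by omega
  have hidx : (p - 0).toNat = n.toNat * n.toNat := by
    have : ((n.toNat * n.toNat : Nat) : Int) = n * n := by push_cast; rw [hcast]
    omega
  rw [hrs, hidx]
  exact finalA n.toNat n 0 (by omega) (by omega) (by omega) (by omega)
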